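-- pv_equiv track=rewrite | github.com/aviralsharmaa/web_wcag_agent | src/accessibility_scanner/agent/flow_runner.py | _reduce_status
-- ===== SOURCE A (Python) =====
-- def _reduce_status(statuses: list[str]) -> str:
--     if not statuses:
--         return "Not evaluated"
--     if "Fail" in statuses:
--         return "Fail"
--     if "Cannot verify automatically" in statuses:
--         return "Cannot verify automatically"
--     if all(item == "Not applicable" for item in statuses):
--         return "Not applicable"
--     if "Pass" in statuses:
--         return "Pass"
--     return "Not evaluated"
-- ===== SOURCE B (Python) =====
-- def _reduce_status(statuses: list[str]) -> str:
--     if not statuses: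
--         return "Not evaluated"
--     has_fail = has_cannot = has_pass = False
--     all_na = True
--     for s in statuses:
--         if s == "Fail":
--             has_fail = True
--         elif s == "Cannot verify automatically":
--             has_cannot = True
--         elif s == "Pass":
--             has_pass = True
--         if s != "Not applicable":
--             all_na = False
--     if has_fail:
--         return "Fail"
--     if has_cannot:
--         return "Cannot verify automatically"
--     if all_na:
--         return "Not applicable"
--     if has_pass:
--         return "Pass"
--     return "Not evaluated"
-- ===== Notes on version B (the rewrite author's own statement) =====
-- stated objective: alternative
-- what changed: Replaced three independent membership scans plus an all() scan with a single pass maintaining has_fail/has_cannot/has_pass/all_na flags, then one precedence cascade.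
import Mathlib
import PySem

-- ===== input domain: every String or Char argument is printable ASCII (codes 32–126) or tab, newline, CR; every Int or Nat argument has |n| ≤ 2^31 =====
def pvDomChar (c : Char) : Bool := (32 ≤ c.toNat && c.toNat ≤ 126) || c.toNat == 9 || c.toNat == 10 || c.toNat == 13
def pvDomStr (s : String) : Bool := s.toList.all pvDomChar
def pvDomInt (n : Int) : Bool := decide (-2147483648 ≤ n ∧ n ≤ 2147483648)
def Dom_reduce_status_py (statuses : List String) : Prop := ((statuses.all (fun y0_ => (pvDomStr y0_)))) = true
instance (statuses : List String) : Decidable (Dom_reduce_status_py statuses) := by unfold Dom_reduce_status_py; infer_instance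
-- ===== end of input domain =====

-- B replaces A's several membership scans and all() scan by one flag-accumulating pass (objective: alternative decomposition, same cost).

-- ===== PORT A =====
def reduce_status_py (statuses : List String) : String :=
  if statuses = [] then "Not evaluated"
  else if statuses.contains "Fail" then "Fail"
  else if statuses.contains "Cannot verify automatically" then "Cannot verify automatically"
  else if statuses.all (fun item => item == "Not applicable") then "Not applicable"
  else if statuses.contains "Pass" then "Pass"
  else "Not evaluated"

-- ===== PORT B =====
-- one pass: (has_fail, has_cannot, has_pass, all_na)
def reduce_status_py_alt_loop (l : List String) (st : Bool × Bool × Bool × Bool) : Bool × Bool × Bool × Bool :=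
  match l with
  | [] => st
  | s :: rest =>
    let st1 :=
      if s == "Fail" then (true, st.2.1, st.2.2.1, st.2.2.2)
      else if s == "Cannot verify automatically" then (st.1, true, st.2.2.1, st.2.2.2)
      else if s == "Pass" then (st.1, st.2.1, true, st.2.2.2)
      else st
    let st2 :=
      if s != "Not applicable" then (st1.1, st1.2.1, st1.2.2.1, false) else st1
    reduce_status_py_alt_loop rest st2

def reduce_status_py_alt (statuses : List String) : String :=
  if statuses = [] then "Not evaluated"
  else
    let st := reduce_status_py_alt_loop statuses (false, false, false, true)
    if st.1 then "Fail"
    else if st.2.1 then "Cannot verify automatically"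
    else if st.2.2.2 then "Not applicable"
    else if st.2.2.1 then "Pass"
    else "Not evaluated"

-- ===== PRECONDITION & SPEC =====
def Spec_reduce_status_py (statuses : List String) (out : String) : Prop := out = reduce_status_py_alt statuses
instance (statuses : List String) (out : String) : Decidable (Spec_reduce_status_py statuses out) := by unfold Spec_reduce_status_py; infer_instance

-- ===== CLAIM (what is proved, stated in full; the proofs are below) =====
def Claim_equal_reduce_status_py : Prop := ∀ (statuses : List String), Dom_reduce_status_py statuses → Spec_reduce_status_py statuses (reduce_status_py statuses)

-- ===== LEMMAS AND PROOFS =====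

theorem loop_char (l : List String) (f c p na : Bool) :
    reduce_status_py_alt_loop l (f, c, p, na) =
      (f || l.contains "Fail",
       c || l.contains "Cannot verify automatically",
       p || l.contains "Pass",
       na && l.all (fun item => item == "Not applicable")) := by
  induction l generalizing f c p na with
  | nil => simp [reduce_status_py_alt_loop]
  | cons s rest ih =>
    simp only [reduce_status_py_alt_loop]
    by_cases h1 : s = "Fail"
    · subst h1; simp [ih]
    · by_cases h2 : s = "Cannot verify automatically"
      · subst h2; simp [ih]
      · by_cases h3 : s = "Pass"
        · subst h3; simp [ih]
        · by_cases h4 : s = "Not applicable"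
          · subst h4; simp [ih, Ne.symm h1, Ne.symm h2, Ne.symm h3]
          · simp [ih, h1, h2, h3, h4, Ne.symm h1, Ne.symm h2, Ne.symm h3]

-- ===== VERDICT (by name: the statement is the Claim_ definition above) =====
theorem reduce_status_py_spec : Claim_equal_reduce_status_py := by
  intro statuses _
  unfold Spec_reduce_status_py reduce_status_py reduce_status_py_alt
  by_cases he : statuses = []
  · simp [he]
  · simp only [he, if_false, loop_char, Bool.false_or, Bool.true_and]
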